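-- pv_equiv track=rewrite | github.com/ZundamonnoVRChatkaisetu/Jarviee | src/core/integration/coordinator/coordinator.py | _create_subtask_hierarchy
-- ===== SOURCE A (Python) =====
-- from typing import Any, Dict, List, Optional, Set, Tuple, Union
--
-- def _create_subtask_hierarchy(subtasks: List[Dict[str, Any]]) -> Dict[int, Set[int]]:
--     """
--     Create a dependency hierarchy for subtasks.
--
--     Args:
--         subtasks: List of subtasks with optional dependency information
--
--     Returns:
--         Dict[int, Set[int]]: Mapping from subtask index to dependent subtask indices
--     """
--     # Map from subtask index to the indices of subtasks that depend on it
--     hierarchy: Dict[int, Set[int]] = {i: set() for i in range(len(subtasks))}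
--
--     # Build dependency graph
--     for i, subtask in enumerate(subtasks):
--         if "dependencies" in subtask and isinstance(subtask["dependencies"], list):
--             # Add this subtask as a dependent for each of its dependencies
--             for dep in subtask["dependencies"]:
--                 if isinstance(dep, int) and 0 <= dep < len(subtasks):
--                     hierarchy[dep].add(i)
--
--     return hierarchy
-- ===== SOURCE B (Python) =====
-- from typing import Any, Dict, List, Set
--
-- def _create_subtask_hierarchy(subtasks: List[Dict[str, Any]]) -> Dict[int, Set[int]]:
--     n = len(subtasks)
--     return {
--         dep: {
--             i
--             for i, st in enumerate(subtasks)
--             if isinstance(st.get("dependencies"), list)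
--             and any(isinstance(d, int) and 0 <= d < n and d == dep for d in st["dependencies"])
--         }
--         for dep in range(n)
--     }
-- ===== Notes on version B (the rewrite author's own statement) =====
-- stated objective: alternative
-- what changed: A makes one forward pass over subtasks, mutating a pre-initialised index->set dict by inserting each subtask's index under each of its in-range dependencies; B builds the mapping directly, for each target index in range(n) scanning all subtasks once to collect those whose dependency list mentions it, with no mutable dict.
import Mathlib
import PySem

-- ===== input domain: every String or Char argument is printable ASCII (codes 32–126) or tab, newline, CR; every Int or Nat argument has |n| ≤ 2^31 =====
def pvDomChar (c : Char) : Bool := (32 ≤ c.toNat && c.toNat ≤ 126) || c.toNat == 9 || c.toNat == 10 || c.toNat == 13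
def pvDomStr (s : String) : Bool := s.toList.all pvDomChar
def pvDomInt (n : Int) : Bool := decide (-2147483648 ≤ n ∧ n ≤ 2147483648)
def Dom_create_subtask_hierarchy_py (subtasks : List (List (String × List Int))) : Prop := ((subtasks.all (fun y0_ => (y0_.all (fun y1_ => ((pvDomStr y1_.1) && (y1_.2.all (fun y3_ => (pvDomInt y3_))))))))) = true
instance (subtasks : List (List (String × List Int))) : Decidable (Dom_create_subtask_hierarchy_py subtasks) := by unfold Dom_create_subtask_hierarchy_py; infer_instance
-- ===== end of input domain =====

-- B inverts the traversal: instead of A's forward edge-insertion pass over each subtask's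
-- dependency list, B builds each entry directly by scanning all subtasks per target index
-- (objective: alternative decomposition, same result).

-- ===== PORT A =====
-- literal port of _create_subtask_hierarchy: init dict {i: set()}, then for each (i, subtask)
-- add i to hierarchy[dep] for every in-range dep in subtask["dependencies"].
-- (isinstance(dep, int) / isinstance(·, list) are always true under the Lean types.)
def create_subtask_hierarchy_py (subtasks : List (List (String × List Int))) : List (Int × List Int) :=
  let n : Int := subtasks.length
  let hierarchy0 : PySem.Dict Int (PySem.Set Int) :=
    (PySem.List.pyRange 0 n).foldl (fun d i => d.insert i PySem.Set.empty) PySem.Dict.empty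
  let hierarchy :=
    (PySem.List.enumerate subtasks).foldl
      (fun d p =>
        match (PySem.Dict.mk p.2).get? "dependencies" with
        | some deps =>
            deps.foldl
              (fun d dep =>
                if 0 ≤ dep ∧ dep < n then d.modify dep PySem.Set.empty (fun s => s.add p.1) else d)
              d
        | none => d)
      hierarchy0
  hierarchy.items

-- ===== PORT B =====
-- literal port of Source B: {dep: {i for i, st in enumerate(subtasks) if … any(… d == dep …)} for dep in range(n)}
def create_subtask_hierarchy_py_alt (subtasks : List (List (String × List Int))) : List (Int × List Int) :=
  let n : Int := subtasks.length
  (PySem.List.pyRange 0 n).map (fun dep =>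
    (dep,
      PySem.Set.ofList
        (((PySem.List.enumerate subtasks).filter (fun p =>
            match (PySem.Dict.mk p.2).get? "dependencies" with
            | some deps => deps.any (fun d => decide (0 ≤ d) && decide (d < n) && (d == dep))
            | none => false)).map (fun p => p.1))))

-- ===== PRECONDITION & SPEC =====
def Spec_create_subtask_hierarchy_py (subtasks : List (List (String × List Int))) (out : List (Int × List Int)) : Prop := out = create_subtask_hierarchy_py_alt subtasks
instance (subtasks : List (List (String × List Int))) (out : List (Int × List Int)) : Decidable (Spec_create_subtask_hierarchy_py subtasks out) := by unfold Spec_create_subtask_hierarchy_py; infer_instance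

-- ===== CLAIM (what is proved, stated in full; the proofs are below) =====
def Claim_equal_create_subtask_hierarchy_py : Prop := ∀ (subtasks : List (List (String × List Int))), Dom_create_subtask_hierarchy_py subtasks → Spec_create_subtask_hierarchy_py subtasks (create_subtask_hierarchy_py subtasks)

-- ===== LEMMAS AND PROOFS =====

-- effect of A's inner dependency loop on the value stored at key `dep`
theorem pv_inner_getD (n i dep : Int) (deps : List Int) (d : PySem.Dict Int (PySem.Set Int)) :
    (deps.foldl
        (fun d dp => if 0 ≤ dp ∧ dp < n then d.modify dp PySem.Set.empty (fun s => s.add i) else d)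
        d).getD dep PySem.Set.empty
      = if deps.any (fun dp => decide (0 ≤ dp) && decide (dp < n) && (dp == dep))
        then (d.getD dep PySem.Set.empty).add i
        else d.getD dep PySem.Set.empty := by
  induction deps generalizing d with
  | nil => simp
  | cons dp deps ih =>
      simp only [List.foldl_cons, ih, List.any_cons]
      by_cases hb : 0 ≤ dp ∧ dp < n
      · by_cases he : dp = dep
        · subst he
          simp [hb]
        · have : (dp == dep) = false := by simp [he]
          simp [hb, PySem.Dict.getD_modify, Ne.symm he, this]
      · have : (decide (0 ≤ dp) && decide (dp < n)) = false := by
          rcases not_and_or.mp hb with h | h <;> simp [h]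
        simp [hb, this]

-- A's inner dependency loop never changes the key list when it equals range(n)
theorem pv_inner_keys (n i : Int) (deps : List Int) (d : PySem.Dict Int (PySem.Set Int))
    (h : d.keys = PySem.List.pyRange 0 n) :
    (deps.foldl
        (fun d dp => if 0 ≤ dp ∧ dp < n then d.modify dp PySem.Set.empty (fun s => s.add i) else d)
        d).keys = PySem.List.pyRange 0 n := by
  induction deps generalizing d with
  | nil => simpa using h
  | cons dp deps ih =>
      simp only [List.foldl_cons]
      apply ih
      by_cases hb : 0 ≤ dp ∧ dp < n
      · have hc : d.contains dp = true := by
          rw [PySem.Dict.contains_iff_mem_keys, h, PySem.List.mem_pyRange_one]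
          exact hb
        simp [hb, PySem.Dict.keys_modify, PySem.Dict.keys_insert_of_contains _ _ hc, h]
      · simp [hb, h]

-- effect of A's whole outer loop on the value stored at key `dep`
theorem pv_outer_getD (n dep : Int) (es : List (Int × List (String × List Int)))
    (d : PySem.Dict Int (PySem.Set Int)) :
    (es.foldl
        (fun d p =>
          match (PySem.Dict.mk p.2).get? "dependencies" with
          | some deps =>
              deps.foldl
                (fun d dp => if 0 ≤ dp ∧ dp < n then d.modify dp PySem.Set.empty (fun s => s.add p.1) else d)
                d
          | none => d)
        d).getD dep PySem.Set.empty
      = (es.filter (fun p =>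
            match (PySem.Dict.mk p.2).get? "dependencies" with
            | some deps => deps.any (fun dp => decide (0 ≤ dp) && decide (dp < n) && (dp == dep))
            | none => false)).foldl
          (fun s p => PySem.Set.add s p.1) (d.getD dep PySem.Set.empty) := by
  induction es generalizing d with
  | nil => simp
  | cons p es ih =>
      simp only [List.foldl_cons, List.filter_cons]
      cases hg : (PySem.Dict.mk p.2).get? "dependencies" with
      | none => exact ih d
      | some deps =>
          rw [ih, pv_inner_getD]
          by_cases hc : (deps.any (fun dp => decide (0 ≤ dp) && decide (dp < n) && (dp == dep))) = true
          · simp [hc]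
          · simp only [hc]
            simp at hc
            simp

-- A's whole outer loop preserves the key list range(n)
theorem pv_outer_keys (n : Int) (es : List (Int × List (String × List Int)))
    (d : PySem.Dict Int (PySem.Set Int)) (h : d.keys = PySem.List.pyRange 0 n) :
    (es.foldl
        (fun d p =>
          match (PySem.Dict.mk p.2).get? "dependencies" with
          | some deps =>
              deps.foldl
                (fun d dp => if 0 ≤ dp ∧ dp < n then d.modify dp PySem.Set.empty (fun s => s.add p.1) else d)
                d
          | none => d)
        d).keys = PySem.List.pyRange 0 n := by
  induction es generalizing d with
  | nil => simpa using h
  | cons p es ih =>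
      simp only [List.foldl_cons]
      apply ih
      cases hg : (PySem.Dict.mk p.2).get? "dependencies" with
      | none => simp [h]
      | some deps => exact pv_inner_keys n p.1 deps d h

-- the initial dict {i: set() for i in range(n)} stores the empty set everywhere
theorem pv_init_getD (R : List Int) (d : PySem.Dict Int (PySem.Set Int))
    (h : ∀ k, d.getD k PySem.Set.empty = PySem.Set.empty) (dep : Int) :
    (R.foldl (fun d i => d.insert i PySem.Set.empty) d).getD dep PySem.Set.empty
      = PySem.Set.empty := by
  induction R generalizing d with
  | nil => simpa using h dep
  | cons i R ih =>
      simp only [List.foldl_cons]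
      apply ih
      intro k
      rw [PySem.Dict.getD_insert]
      split
      · rfl
      · exact h k

-- the initial dict's keys are exactly range(n)
theorem pv_init_keys (n : Int) :
    ((PySem.List.pyRange 0 n).foldl
        (fun (d : PySem.Dict Int (PySem.Set Int)) i => d.insert i PySem.Set.empty)
        PySem.Dict.empty).keys = PySem.List.pyRange 0 n := by
  rw [PySem.Dict.keys_foldl_insert (f := fun _ _ => PySem.Set.empty)]
  simp [PySem.Dict.keys_empty, PySem.Set.update, ← PySem.Set.ofList_eq_foldl,
    PySem.Set.ofList_eq_self_of_nodup _ (PySem.List.nodup_pyRange_one 0 n)]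

-- folding conditional adds over a list is folding add over the filtered projection
theorem pv_foldl_filter_add (cond : Int × List (String × List Int) → Bool)
    (es : List (Int × List (String × List Int))) (s : PySem.Set Int) :
    ((es.filter cond).map (fun p => p.1)).foldl PySem.Set.add s
      = (es.filter cond).foldl (fun s p => PySem.Set.add s p.1) s := by
  induction es generalizing s with
  | nil => rfl
  | cons p es ih =>
      simp only [List.filter_cons]
      split <;> simp [ih]

-- ===== VERDICT (by name: the statement is the Claim_ definition above) =====
theorem create_subtask_hierarchy_py_spec : Claim_equal_create_subtask_hierarchy_py := by
  intro subtasks _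
  unfold Spec_create_subtask_hierarchy_py create_subtask_hierarchy_py create_subtask_hierarchy_py_alt
  simp only []
  set n : Int := (subtasks.length : Int) with hn
  set d0 : PySem.Dict Int (PySem.Set Int) :=
    (PySem.List.pyRange 0 n).foldl (fun d i => d.insert i PySem.Set.empty) PySem.Dict.empty with hd0
  have hkeys0 : d0.keys = PySem.List.pyRange 0 n := pv_init_keys n
  have hkeys := pv_outer_keys n (PySem.List.enumerate subtasks) d0 hkeys0
  rw [PySem.Dict.items_eq_map_keys _ (by rw [hkeys]; exact PySem.List.nodup_pyRange_one 0 n)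
    PySem.Set.empty, hkeys]
  apply List.map_congr_left
  intro dep _
  rw [pv_outer_getD, pv_init_getD _ _ (fun k => PySem.Dict.getD_empty k _),
    PySem.Set.ofList_eq_foldl, pv_foldl_filter_add]
  rfl
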